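-- pv_equiv track=rewrite | github.com/Heeesuu/CT_Algorithm | 프로그래머스/unrated/181834. l로 만들기/l로 만들기.py | solution
-- ===== SOURCE A (Python) =====
-- def solution(myString):
--     answer = ''
--
--     for ch in myString:
--         if ch < 'l':
--             answer += 'l'
--         else:
--             answer += ch
--     return answer
-- ===== SOURCE B (Python) =====
-- def solution(myString):
--     table = {i: 'l' for i in range(ord('l'))}
--     return myString.translate(table)
-- ===== Notes on version B (the rewrite author's own statement) =====
-- stated objective: idiomatic
-- what changed: Replaces the explicit loop-with-branch and repeated string concatenation by a precomputed translation table for all code points below ord('l') applied with str.translate in one pass.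
import Mathlib
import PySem

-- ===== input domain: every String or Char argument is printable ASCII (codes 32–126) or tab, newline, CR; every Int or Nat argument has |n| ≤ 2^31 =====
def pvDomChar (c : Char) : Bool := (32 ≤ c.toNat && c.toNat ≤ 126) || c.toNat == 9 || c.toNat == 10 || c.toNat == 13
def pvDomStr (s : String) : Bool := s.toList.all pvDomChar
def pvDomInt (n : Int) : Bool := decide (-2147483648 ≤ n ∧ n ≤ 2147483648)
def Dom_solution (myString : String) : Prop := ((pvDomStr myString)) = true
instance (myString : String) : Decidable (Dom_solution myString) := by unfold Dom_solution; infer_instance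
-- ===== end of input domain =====

-- B replaces A's loop-with-branch by a precomputed translation table (code point → 'l') applied in one pass (idiomatic).

-- ===== PORT A =====
-- answer = ''; for ch in myString: answer += 'l' if ch < 'l' else ch  (strings ported as List Char)
def solution (myString : String) : String :=
  String.mk (myString.toList.foldl
    (fun answer ch => answer ++ (if ch < 'l' then ['l'] else [ch])) [])

-- ===== PORT B =====
-- table = {i: 'l' for i in range(ord('l'))}
def solTable : PySem.Dict Int Char :=
  (PySem.List.pyRange 0 108 1).foldl (fun d i => d.insert i 'l') PySem.Dict.empty

-- myString.translate(table): each char is looked up by code point, untabled chars pass through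
def solution_alt (myString : String) : String :=
  String.mk (myString.toList.map (fun c => solTable.getD (c.toNat : Int) c))

-- ===== PRECONDITION & SPEC =====
def Spec_solution (myString : String) (out : String) : Prop := out = solution_alt myString
instance (myString : String) (out : String) : Decidable (Spec_solution myString out) := by unfold Spec_solution; infer_instance

-- ===== CLAIM (what is proved, stated in full; the proofs are below) =====
def Claim_equal_solution : Prop := ∀ (myString : String), Dom_solution myString → Spec_solution myString (solution myString)

-- ===== LEMMAS AND PROOFS =====

theorem getD_foldl_insert_const (l : List Int) (d : PySem.Dict Int Char) (k : Int) (c : Char) :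
    (l.foldl (fun d i => d.insert i 'l') d).getD k c
      = if k ∈ l then 'l' else d.getD k c := by
  induction l generalizing d with
  | nil => simp
  | cons x xs ih =>
      simp only [List.foldl_cons, ih, PySem.Dict.getD_insert, List.mem_cons]
      by_cases hx : k = x <;> simp [hx]

theorem solTable_getD (k : Int) (c : Char) :
    solTable.getD k c = if 0 ≤ k ∧ k < 108 then 'l' else c := by
  rw [solTable, getD_foldl_insert_const]
  simp [PySem.List.mem_pyRange_one]

theorem foldl_append_branch (l : List Char) (acc : List Char) :
    (l.foldl (fun answer ch => answer ++ (if ch < 'l' then ['l'] else [ch])) acc)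
      = acc ++ l.map (fun ch => if ch < 'l' then 'l' else ch) := by
  induction l generalizing acc with
  | nil => simp
  | cons x xs ih => by_cases hx : x < 'l' <;> simp [hx, ih]

theorem char_branch_eq_table (c : Char) :
    (if c < 'l' then 'l' else c) = solTable.getD (c.toNat : Int) c := by
  rw [solTable_getD]
  have hlt : c < 'l' ↔ c.toNat < 108 := by
    rw [Char.lt_def, UInt32.lt_iff_toNat_lt]; rfl
  by_cases h : c < 'l'
  · have h108 := hlt.mp h
    rw [if_pos h, if_pos (by omega)]
  · have h108 : ¬ c.toNat < 108 := fun hh => h (hlt.mpr hh)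
    rw [if_neg h, if_neg (by omega)]

-- ===== VERDICT (by name: the statement is the Claim_ definition above) =====
theorem solution_spec : Claim_equal_solution := by
  intro s _
  unfold Spec_solution solution solution_alt
  rw [foldl_append_branch]
  simp [char_branch_eq_table]
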